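-- pv_equiv track=rewrite | github.com/Runarok/GeeksForGeeks-solutions | Difficulty: Basic/Reverse a string with spaces intact/reverse-a-string-with-spaces-intact.py | reverseWithSpacesIntact
-- ===== SOURCE A (Python) =====
-- def reverseWithSpacesIntact(s):
--     # Convert the input string into a list for easier manipulation
--     l = list(s)
--
--     # Initialize two pointers: left at the beginning and right at the end of the list
--     left = 0
--     right = len(s) - 1
--
--     # Loop until the left pointer is less than or equal to the right pointer
--     while left <= right:
--         # If both characters are not spaces, swap them
--         if l[left] != " " and l[right] != " ":
--             l[left], l[right] = l[right], l[left]
--             left += 1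
--             right -= 1
--         # If the left character is a space, move the left pointer to the right
--         elif l[left] == " ":
--             left += 1
--         # If the right character is a space, move the right pointer to the left
--         else:
--             right -= 1
--
--     # Convert the list back to a string and return it
--     s = "".join(l)
--     return s
-- ===== SOURCE B (Python) =====
-- def reverseWithSpacesIntact(s):
--     rev = iter([c for c in s if c != ' '][::-1])
--     return ''.join(' ' if c == ' ' else next(rev) for c in s)
-- ===== Notes on version B (the rewrite author's own statement) =====
-- stated objective: simpler
-- what changed: Replaces the in-place symmetric two-pointer swap loop with a gather-reverse-reassemble pass: collect the non-space characters, reverse them, and emit them in order wherever the original string has a non-space, keeping spaces in place.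
import Mathlib
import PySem

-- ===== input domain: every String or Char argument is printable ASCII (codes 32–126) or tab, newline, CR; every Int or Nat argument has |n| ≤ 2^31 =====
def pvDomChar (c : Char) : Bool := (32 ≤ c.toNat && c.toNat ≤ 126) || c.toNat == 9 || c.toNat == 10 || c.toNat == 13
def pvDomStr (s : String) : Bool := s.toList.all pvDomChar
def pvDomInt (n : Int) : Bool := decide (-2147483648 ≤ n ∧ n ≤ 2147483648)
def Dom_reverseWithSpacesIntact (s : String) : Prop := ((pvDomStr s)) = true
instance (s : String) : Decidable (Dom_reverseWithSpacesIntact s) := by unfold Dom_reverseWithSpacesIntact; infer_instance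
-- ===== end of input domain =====

-- B replaces A's in-place two-pointer swap loop with a gather-reverse-reassemble pass (same cost, simpler).

-- ===== PORT A =====
-- A's while loop; left/right are Python ints. In every reachable call the indices read/written
-- are in range, so the pyGetD/pySetD defaults are never used (Python never raises here).
def pvSwapLoop (l : List Char) (left right : Int) : List Char :=
  if _h : left ≤ right then
    if PySem.List.pyGetD l left ' ' ≠ ' ' ∧ PySem.List.pyGetD l right ' ' ≠ ' ' then
      -- l[left], l[right] = l[right], l[left]  (RHS read from the original l)
      pvSwapLoop
        (PySem.List.pySetD (PySem.List.pySetD l left (PySem.List.pyGetD l right ' '))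
          right (PySem.List.pyGetD l left ' '))
        (left + 1) (right - 1)
    else if PySem.List.pyGetD l left ' ' = ' ' then
      pvSwapLoop l (left + 1) right
    else
      pvSwapLoop l left (right - 1)
  else l
termination_by (right + 1 - left).toNat
decreasing_by all_goals omega

def reverseWithSpacesIntact (s : String) : String :=
  String.ofList (pvSwapLoop s.toList 0 ((s.toList.length : Int) - 1))

-- ===== PORT B =====
-- ''.join(' ' if c == ' ' else next(rev) for c in s): consume the reversed non-space buffer.
-- The [] branch of the buffer is unreachable (the buffer holds one char per non-space of s).
def pvFill : List Char → List Char → List Char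
  | [], _ => []
  | c :: cs, q =>
    if c = ' ' then ' ' :: pvFill cs q
    else
      match q with
      | [] => []
      | x :: q' => x :: pvFill cs q'

def reverseWithSpacesIntact_alt (s : String) : String :=
  String.ofList (pvFill s.toList ((s.toList.filter (· != ' ')).reverse))

-- ===== PRECONDITION & SPEC =====
def Spec_reverseWithSpacesIntact (s : String) (out : String) : Prop := out = reverseWithSpacesIntact_alt s
instance (s : String) (out : String) : Decidable (Spec_reverseWithSpacesIntact s out) := by unfold Spec_reverseWithSpacesIntact; infer_instance

-- ===== CLAIM (what is proved, stated in full; the proofs are below) =====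
def Claim_equal_reverseWithSpacesIntact : Prop := ∀ (s : String), Dom_reverseWithSpacesIntact s → Spec_reverseWithSpacesIntact s (reverseWithSpacesIntact s)

-- ===== LEMMAS AND PROOFS =====

-- B's whole computation on a character list.
def spaceRev (xs : List Char) : List Char := pvFill xs ((xs.filter (· != ' ')).reverse)

theorem pvFill_nil (q : List Char) : pvFill [] q = [] := rfl

theorem pvFill_space (cs q : List Char) : pvFill (' ' :: cs) q = ' ' :: pvFill cs q := by
  simp [pvFill]

theorem pvFill_append (xs ys q : List Char)
    (h : (xs.filter (· != ' ')).length ≤ q.length) :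
    pvFill (xs ++ ys) q = pvFill xs q ++ pvFill ys (q.drop (xs.filter (· != ' ')).length) := by
  induction xs generalizing q with
  | nil => simp [pvFill_nil]
  | cons c cs ih =>
    by_cases hc : c = ' '
    · subst hc
      simp only [List.cons_append, pvFill_space]
      rw [ih q (by simpa using h)]
      simp
    · cases q with
      | nil => simp [hc] at h
      | cons x q' =>
        simp only [List.cons_append, pvFill, if_neg hc]
        rw [ih q' (by simpa [List.filter_cons, hc] using h)]
        simp [hc]

theorem pvFill_tail (xs q r : List Char)
    (h : (xs.filter (· != ' ')).length ≤ q.length) :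
    pvFill xs (q ++ r) = pvFill xs q := by
  induction xs generalizing q with
  | nil => simp [pvFill_nil]
  | cons c cs ih =>
    by_cases hc : c = ' '
    · subst hc
      simp only [pvFill_space]
      rw [ih q (by simpa using h)]
    · cases q with
      | nil => simp [hc] at h
      | cons x q' =>
        simp only [List.cons_append, pvFill, if_neg hc]
        rw [ih q' (by simpa [List.filter_cons, hc] using h)]

theorem spaceRev_nil : spaceRev [] = [] := rfl

theorem spaceRev_space_cons (xs : List Char) :
    spaceRev (' ' :: xs) = ' ' :: spaceRev xs := by
  simp [spaceRev, pvFill_space]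

theorem spaceRev_space_snoc (xs : List Char) :
    spaceRev (xs ++ [' ']) = spaceRev xs ++ [' '] := by
  unfold spaceRev
  have hf : (xs ++ [' ']).filter (· != ' ') = xs.filter (· != ' ') := by
    simp [List.filter_append]
  rw [hf, pvFill_append xs [' '] _ (by simp), pvFill_space, pvFill_nil]

theorem spaceRev_single (c : Char) (hc : c ≠ ' ') : spaceRev [c] = [c] := by
  simp [spaceRev, hc, pvFill]

theorem spaceRev_swap (c₁ c₂ : Char) (mid : List Char) (h₁ : c₁ ≠ ' ') (h₂ : c₂ ≠ ' ') :
    spaceRev (c₁ :: (mid ++ [c₂])) = c₂ :: (spaceRev mid ++ [c₁]) := by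
  unfold spaceRev
  have hf : (c₁ :: (mid ++ [c₂])).filter (· != ' ')
      = c₁ :: (mid.filter (· != ' ') ++ [c₂]) := by
    simp [List.filter_append, h₁, h₂]
  rw [hf]
  have hrev : (c₁ :: (mid.filter (· != ' ') ++ [c₂])).reverse
      = c₂ :: ((mid.filter (· != ' ')).reverse ++ [c₁]) := by simp
  rw [hrev]
  show pvFill (c₁ :: (mid ++ [c₂])) _ = _
  rw [show pvFill (c₁ :: (mid ++ [c₂])) (c₂ :: ((mid.filter (· != ' ')).reverse ++ [c₁]))
      = c₂ :: pvFill (mid ++ [c₂]) ((mid.filter (· != ' ')).reverse ++ [c₁]) by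
    simp [pvFill, h₁]]
  rw [pvFill_append mid [c₂] _ (by simp)]
  rw [pvFill_tail mid ((mid.filter (· != ' ')).reverse) [c₁] (by simp)]
  have hdrop : (((mid.filter (· != ' ')).reverse ++ [c₁]).drop
      (mid.filter (· != ' ')).length) = [c₁] := by
    rw [show (mid.filter (· != ' ')).length = (mid.filter (· != ' ')).reverse.length by simp]
    exact List.drop_left
  rw [hdrop]
  simp [pvFill, h₂]

-- The loop with frame pre/post around the active segment computes spaceRev on the segment.
theorem pvSwapLoop_frame (seg pre post : List Char) :
    pvSwapLoop (pre ++ seg ++ post) (pre.length : Int) ((pre.length : Int) + seg.length - 1)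
      = pre ++ spaceRev seg ++ post := by
  rcases seg with _ | ⟨c₁, rest⟩
  · rw [show ((pre.length : Int) + (([] : List Char).length : Nat) - 1) = (pre.length : Int) - 1 by
      simp]
    rw [pvSwapLoop, dif_neg (by omega)]
    simp [spaceRev_nil]
  · rcases List.eq_nil_or_concat rest with hrest | ⟨mid, c₂, hrest⟩
    · -- singleton segment [c₁]
      subst hrest
      have hidx : ((pre.length : Int) + ([c₁] : List Char).length - 1) = (pre.length : Int) := by
        simp
      rw [hidx, pvSwapLoop]
      rw [dif_pos (by omega)]
      have hget : PySem.List.pyGetD (pre ++ [c₁] ++ post) (pre.length : Int) ' ' = c₁ := by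
        rw [PySem.List.pyGetD_natCast]; simp
      rw [hget]
      by_cases hc : c₁ = ' '
      · rw [if_neg (by simp [hc]), if_pos hc]
        rw [pvSwapLoop, dif_neg (by omega)]
        subst hc; simp [spaceRev_space_cons, spaceRev_nil]
      · rw [if_pos ⟨hc, hc⟩]
        have hset : PySem.List.pySetD (PySem.List.pySetD (pre ++ [c₁] ++ post)
            (pre.length : Int) c₁) (pre.length : Int) c₁ = pre ++ [c₁] ++ post := by
          rw [PySem.List.pySetD_natCast]
          simp
        rw [hset, pvSwapLoop, dif_neg (by omega)]
        simp [spaceRev_single c₁ hc]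
    · -- segment c₁ :: mid ++ [c₂]
      rw [List.concat_eq_append] at hrest
      subst hrest
      have hlen : ((c₁ :: (mid ++ [c₂])) : List Char).length = mid.length + 2 := by simp
      have hr : ((pre.length : Int) + ((c₁ :: (mid ++ [c₂])) : List Char).length - 1)
          = (((pre ++ [c₁] ++ mid).length : Nat) : Int) := by
        rw [hlen]; push_cast; simp; omega
      rw [hr, pvSwapLoop]
      rw [dif_pos (by omega)]
      have hl2 : pre ++ (c₁ :: (mid ++ [c₂])) ++ post
          = (pre ++ [c₁] ++ mid) ++ c₂ :: post := by simp
      have hgetl : PySem.List.pyGetD (pre ++ (c₁ :: (mid ++ [c₂])) ++ post)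
          (pre.length : Int) ' ' = c₁ := by
        rw [PySem.List.pyGetD_natCast]; simp
      have hgetr : PySem.List.pyGetD (pre ++ (c₁ :: (mid ++ [c₂])) ++ post)
          ((((pre ++ [c₁] ++ mid).length : Nat)) : Int) ' ' = c₂ := by
        rw [PySem.List.pyGetD_natCast, hl2]; simp
      rw [hgetl, hgetr]
      by_cases h₁ : c₁ = ' '
      · rw [if_neg (by simp [h₁]), if_pos h₁]
        subst h₁
        have : pre ++ (' ' :: (mid ++ [c₂])) ++ post
            = (pre ++ [' ']) ++ (mid ++ [c₂]) ++ post := by simp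
        rw [this]
        rw [show ((pre.length : Int) + 1) = (((pre ++ [' ']).length : Nat) : Int) by simp]
        rw [show ((((pre ++ [' '] ++ mid).length : Nat)) : Int)
            = (((pre ++ [' ']).length : Nat) : Int) + ((mid ++ [c₂] : List Char).length : Nat) - 1 by
          simp; omega]
        rw [pvSwapLoop_frame (mid ++ [c₂]) (pre ++ [' ']) post]
        simp [spaceRev_space_cons]
      · by_cases h₂ : c₂ = ' '
        · rw [if_neg (by simp [h₂]), if_neg h₁]
          subst h₂
          have : pre ++ (c₁ :: (mid ++ [' '])) ++ post
              = pre ++ (c₁ :: mid) ++ (' ' :: post) := by simp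
          rw [this]
          have hargs : (((pre ++ [c₁] ++ mid).length : Nat) : Int) - 1
              = (pre.length : Int) + ((c₁ :: mid : List Char).length : Nat) - 1 := by
            simp
          rw [hargs, pvSwapLoop_frame (c₁ :: mid) pre (' ' :: post)]
          have : spaceRev (c₁ :: (mid ++ [' '])) = spaceRev (c₁ :: mid) ++ [' '] := by
            rw [show c₁ :: (mid ++ [' ']) = (c₁ :: mid) ++ [' '] by simp,
              spaceRev_space_snoc]
          rw [this]; simp
        · rw [if_pos ⟨h₁, h₂⟩]
          have hset : PySem.List.pySetD (PySem.List.pySetD (pre ++ (c₁ :: (mid ++ [c₂])) ++ post)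
                (pre.length : Int) c₂) ((((pre ++ [c₁] ++ mid).length : Nat)) : Int) c₁
              = (pre ++ [c₂]) ++ mid ++ (c₁ :: post) := by
            rw [PySem.List.pySetD_natCast, PySem.List.pySetD_natCast]
            rw [show pre ++ (c₁ :: (mid ++ [c₂])) ++ post = pre ++ c₁ :: (mid ++ c₂ :: post) by simp]
            rw [show (pre ++ c₁ :: (mid ++ c₂ :: post)).set pre.length c₂
                = pre ++ c₂ :: (mid ++ c₂ :: post) by simp]
            rw [show pre ++ c₂ :: (mid ++ c₂ :: post) = (pre ++ c₂ :: mid) ++ c₂ :: post by simp]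
            rw [show (pre ++ [c₁] ++ mid).length = (pre ++ c₂ :: mid).length by simp]
            rw [show ((pre ++ c₂ :: mid) ++ c₂ :: post).set (pre ++ c₂ :: mid).length c₁
                = (pre ++ c₂ :: mid) ++ c₁ :: post by simp]
            simp
          rw [hset]
          have hargs₁ : ((pre.length : Int) + 1) = (((pre ++ [c₂]).length : Nat) : Int) := by
            simp
          have hargs₂ : ((((pre ++ [c₁] ++ mid).length : Nat) : Int)) - 1
              = (((pre ++ [c₂]).length : Nat) : Int) + (mid.length : Nat) - 1 := by
            simp; try omega
          rw [hargs₁, hargs₂, pvSwapLoop_frame mid (pre ++ [c₂]) (c₁ :: post)]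
          rw [spaceRev_swap c₁ c₂ mid h₁ h₂]
          simp
termination_by seg.length
-- ===== VERDICT (by name: the statement is the Claim_ definition above) =====
theorem reverseWithSpacesIntact_spec : Claim_equal_reverseWithSpacesIntact := by
  intro s _hdom
  show _ = _
  unfold reverseWithSpacesIntact reverseWithSpacesIntact_alt
  have h := pvSwapLoop_frame s.toList [] []
  simp only [List.nil_append, List.append_nil, List.length_nil, Nat.cast_zero, zero_add] at h
  rw [h]
  rfl
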